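-- pv_equiv track=rewrite | github.com/zhanglang2333/RecallDoggy | app.py | check_upgrade
-- ===== SOURCE A (Python) =====
-- UPGRADE_THRESHOLDS = {1: "short", 4: "long", 10: "permanent"}
--
-- LEVEL_ORDER = ["flash", "short", "long", "permanent"]
--
-- def check_upgrade(memory_level, recall_count):
--     if memory_level == "permanent":
--         return "permanent"
--     for threshold in sorted(UPGRADE_THRESHOLDS.keys(), reverse=True):
--         if recall_count >= threshold:
--             target = UPGRADE_THRESHOLDS[threshold]
--             if LEVEL_ORDER.index(target) > LEVEL_ORDER.index(memory_level):
--                 return target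
--     return memory_level
-- ===== SOURCE B (Python) =====
-- UPGRADE_THRESHOLDS = {1: "short", 4: "long", 10: "permanent"}
--
-- LEVEL_ORDER = ["flash", "short", "long", "permanent"]
--
-- def check_upgrade(memory_level, recall_count):
--     if memory_level == "permanent":
--         return "permanent"
--     # The number of satisfied thresholds is exactly the LEVEL_ORDER index of the
--     # level earned by recall_count (0 thresholds -> flash, ... 3 -> permanent),
--     # so no threshold->value lookup is needed at all.
--     earned = sum(1 for t in UPGRADE_THRESHOLDS if recall_count >= t)
--     if earned == 0:
--         return memory_level
--     return LEVEL_ORDER[max(earned, LEVEL_ORDER.index(memory_level))]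
-- ===== Notes on version B (the rewrite author's own statement) =====
-- stated objective: simpler
-- what changed: B never scans sorted thresholds for a target value: it counts how many thresholds recall_count satisfies, which is exactly the LEVEL_ORDER index of the earned level, and returns LEVEL_ORDER[max(earned, current_index)] -- an arithmetic rank-max instead of A's descending scan with an in-loop rank comparison and early return.
import Mathlib
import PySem

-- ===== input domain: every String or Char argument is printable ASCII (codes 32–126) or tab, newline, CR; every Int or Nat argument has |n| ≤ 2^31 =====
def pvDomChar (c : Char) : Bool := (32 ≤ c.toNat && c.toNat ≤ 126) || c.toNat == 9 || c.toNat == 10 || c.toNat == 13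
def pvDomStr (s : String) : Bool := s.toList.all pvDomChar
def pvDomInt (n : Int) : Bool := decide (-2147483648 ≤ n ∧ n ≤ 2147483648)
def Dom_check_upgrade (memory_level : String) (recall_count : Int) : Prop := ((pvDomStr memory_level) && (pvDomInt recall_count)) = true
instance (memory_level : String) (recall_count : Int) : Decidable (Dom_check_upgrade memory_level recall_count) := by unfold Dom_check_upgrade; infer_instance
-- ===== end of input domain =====

-- B drops A's descending threshold scan with in-loop rank test: it counts the
-- satisfied thresholds (that count is the earned level's index in LEVEL_ORDER)
-- and indexes LEVEL_ORDER at the max of earned and current rank (objective: simpler).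

-- ===== PORT A =====
def UPGRADE_THRESHOLDS : PySem.Dict Int String :=
  PySem.Dict.ofList [(1, "short"), (4, "long"), (10, "permanent")]

def LEVEL_ORDER : List String := ["flash", "short", "long", "permanent"]

-- A's for-loop with early return: recursion over the descending-sorted thresholds.
-- LEVEL_ORDER.index raises ValueError when the item is absent (index? = none); those
-- inputs are outside Pre_, the port returns 0 there only to stay total.
def check_upgrade_loopA (memory_level : String) (recall_count : Int) : List Int → String
  | [] => memory_level
  | threshold :: rest =>
    if recall_count ≥ threshold then
      let target := UPGRADE_THRESHOLDS.getD threshold ""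
      if (PySem.List.index? LEVEL_ORDER target).getD 0 >
         (PySem.List.index? LEVEL_ORDER memory_level).getD 0 then target
      else check_upgrade_loopA memory_level recall_count rest
    else check_upgrade_loopA memory_level recall_count rest

def check_upgrade (memory_level : String) (recall_count : Int) : String :=
  if memory_level = "permanent" then "permanent"
  else check_upgrade_loopA memory_level recall_count
    (PySem.List.sorted UPGRADE_THRESHOLDS.keys (fun k => k) true)

-- ===== PORT B =====
-- `for t in UPGRADE_THRESHOLDS` iterates the dict's keys in insertion order.
-- `.index` and the list indexing are partial in Python; outside Pre_ they would
-- raise, the port's getD defaults only keep it total.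
def check_upgrade_alt (memory_level : String) (recall_count : Int) : String :=
  if memory_level = "permanent" then "permanent"
  else
    let earned : Int :=
      UPGRADE_THRESHOLDS.keys.foldl (fun n t => if recall_count ≥ t then n + 1 else n) 0
    if earned = 0 then memory_level
    else
      (PySem.List.pyGet? LEVEL_ORDER
        (max earned ((PySem.List.index? LEVEL_ORDER memory_level).getD 0))).getD ""

-- ===== PRECONDITION & SPEC =====
-- Pre_ excludes exactly the inputs where A raises ValueError (memory_level not in
-- LEVEL_ORDER while some threshold fires, i.e. recall_count >= 1); B raises there too.
def Pre_check_upgrade (memory_level : String) (recall_count : Int) : Prop :=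
  memory_level ∈ LEVEL_ORDER ∨ recall_count < 1
instance (memory_level : String) (recall_count : Int) : Decidable (Pre_check_upgrade memory_level recall_count) := by unfold Pre_check_upgrade; infer_instance

def pvWitness_check_upgrade : String × Int := ("short", 5)

def Spec_check_upgrade (memory_level : String) (recall_count : Int) (out : String) : Prop := out = check_upgrade_alt memory_level recall_count
instance (memory_level : String) (recall_count : Int) (out : String) : Decidable (Spec_check_upgrade memory_level recall_count out) := by unfold Spec_check_upgrade; infer_instance

-- ===== CLAIM =====
def Claim_equal_check_upgrade : Prop := ∀ (memory_level : String) (recall_count : Int), Dom_check_upgrade memory_level recall_count → Pre_check_upgrade memory_level recall_count → Spec_check_upgrade memory_level recall_count (check_upgrade memory_level recall_count)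

-- ===== LEMMAS AND PROOFS =====

theorem sorted_keys_desc :
    PySem.List.sorted ([1, 4, 10] : List Int) (fun k => k) true = [10, 4, 1] := by decide

theorem keys_eq : UPGRADE_THRESHOLDS.keys = [1, 4, 10] := by decide

-- With memory_level fixed, both programs are determined by which of the three
-- threshold tests hold; case-bash over the four valid levels.
theorem check_upgrade_eq_of_mem (memory_level : String) (recall_count : Int)
    (h : memory_level ∈ LEVEL_ORDER) :
    check_upgrade memory_level recall_count = check_upgrade_alt memory_level recall_count := by
  fin_cases h <;>
    by_cases h10 : recall_count ≥ 10 <;> by_cases h4 : recall_count ≥ 4 <;>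
      by_cases h1 : recall_count ≥ 1 <;>
    first
      | omega
      | (simp [check_upgrade, check_upgrade_alt, check_upgrade_loopA,
            sorted_keys_desc, keys_eq, h10, h4, h1]
         <;> decide)

theorem check_upgrade_eq_of_low (memory_level : String) (recall_count : Int)
    (h : recall_count < 1) :
    check_upgrade memory_level recall_count = check_upgrade_alt memory_level recall_count := by
  by_cases hp : memory_level = "permanent" <;>
    simp [check_upgrade, check_upgrade_alt, check_upgrade_loopA,
      sorted_keys_desc, keys_eq, hp,
      show ¬ recall_count ≥ 10 by omega, show ¬ recall_count ≥ 4 by omega,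
      show ¬ recall_count ≥ 1 by omega]

-- ===== VERDICT =====
theorem check_upgrade_spec : Claim_equal_check_upgrade := by
  intro memory_level recall_count _ hpre
  unfold Spec_check_upgrade
  rcases hpre with h | h
  · exact check_upgrade_eq_of_mem memory_level recall_count h
  · exact check_upgrade_eq_of_low memory_level recall_count h
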